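-- pv_equiv track=rewrite | github.com/guilherme-vilanova/surfspot-finder | app.py | swell_quality_score
-- ===== SOURCE A (Python) =====
-- def angle_diff(a, b):
--     diff = abs(a - b) % 360
--     return min(diff, 360 - diff)
--
-- def swell_quality_score(wave_direction, preferred_directions):
--     if wave_direction is None or not preferred_directions:
--         return 0
--
--     nearest_diff = min(angle_diff(wave_direction, direction) for direction in preferred_directions)
--
--     if nearest_diff <= 20:
--         return 3
--     if nearest_diff <= 45:
--         return 2
--     if nearest_diff <= 70:
--         return 1
--
--     return 0
-- ===== SOURCE B (Python) =====
-- def angle_diff(a, b):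
--     diff = abs(a - b) % 360
--     return min(diff, 360 - diff)
--
-- def _direction_score(wave_direction, direction):
--     diff = angle_diff(wave_direction, direction)
--     if diff <= 20:
--         return 3
--     if diff <= 45:
--         return 2
--     if diff <= 70:
--         return 1
--     return 0
--
-- def swell_quality_score(wave_direction, preferred_directions):
--     if wave_direction is None or not preferred_directions:
--         return 0
--     best = 0
--     for direction in preferred_directions:
--         s = _direction_score(wave_direction, direction)
--         if best < s:
--             best = s
--     return best
-- ===== Notes on version B (the rewrite author's own statement) =====
-- stated objective: alternative
-- what changed: B scores each preferred direction individually (diff bucketed to 3/2/1/0) and keeps a running maximum score, instead of first taking the minimum angular difference over all directions and bucketing once; correct because the bucketing is monotone non-increasing in the angular difference.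
import Mathlib
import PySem

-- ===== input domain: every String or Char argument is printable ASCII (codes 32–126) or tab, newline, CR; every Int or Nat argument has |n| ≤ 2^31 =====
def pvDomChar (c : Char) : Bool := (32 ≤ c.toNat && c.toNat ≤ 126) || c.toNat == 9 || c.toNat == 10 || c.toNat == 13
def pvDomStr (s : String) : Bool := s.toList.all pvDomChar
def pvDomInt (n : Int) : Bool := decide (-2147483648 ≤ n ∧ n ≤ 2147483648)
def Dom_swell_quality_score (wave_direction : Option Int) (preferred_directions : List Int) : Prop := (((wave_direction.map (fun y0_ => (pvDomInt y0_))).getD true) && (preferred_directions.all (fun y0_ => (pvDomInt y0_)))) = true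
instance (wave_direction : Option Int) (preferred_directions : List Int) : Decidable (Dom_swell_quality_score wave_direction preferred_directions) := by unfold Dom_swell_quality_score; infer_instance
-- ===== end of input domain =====

-- B replaces A's min-of-angle-differences-then-bucket with per-direction bucketed scores and a running maximum (alternative decomposition; bucketing is antitone, so the results coincide).
-- ===== PORT A =====
def angleDiff (a b : Int) : Int :=
  let diff := PySem.Int.mod (|a - b|) 360
  min diff (360 - diff)

def swell_quality_score (wave_direction : Option Int) (preferred_directions : List Int) : Int :=
  match wave_direction with
  | none => 0
  | some wd =>
    if preferred_directions = [] then 0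
    else
      match PySem.List.min? (preferred_directions.map (fun direction => angleDiff wd direction)) (fun y => y) with
      | none => 0  -- unreachable: the list is nonempty
      | some nearest_diff =>
        if nearest_diff ≤ 20 then 3
        else if nearest_diff ≤ 45 then 2
        else if nearest_diff ≤ 70 then 1
        else 0

-- ===== PORT B =====
-- B: score each direction individually and keep a running maximum (same thresholds).
def directionScore (wave_direction direction : Int) : Int :=
  let diff := angleDiff wave_direction direction
  if diff ≤ 20 then 3
  else if diff ≤ 45 then 2
  else if diff ≤ 70 then 1
  else 0

def swell_quality_score_alt (wave_direction : Option Int) (preferred_directions : List Int) : Int :=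
  match wave_direction with
  | none => 0
  | some wd =>
    if preferred_directions = [] then 0
    else
      preferred_directions.foldl
        (fun best direction =>
          let s := directionScore wd direction
          if best < s then s else best) 0

-- ===== PRECONDITION & SPEC =====
def Spec_swell_quality_score (wave_direction : Option Int) (preferred_directions : List Int) (out : Int) : Prop := out = swell_quality_score_alt wave_direction preferred_directions
instance (wave_direction : Option Int) (preferred_directions : List Int) (out : Int) : Decidable (Spec_swell_quality_score wave_direction preferred_directions out) := by unfold Spec_swell_quality_score; infer_instance

-- ===== CLAIM (what is proved, stated in full; the proofs are below) =====
def Claim_equal_swell_quality_score : Prop := ∀ (wave_direction : Option Int) (preferred_directions : List Int), Dom_swell_quality_score wave_direction preferred_directions → Spec_swell_quality_score wave_direction preferred_directions (swell_quality_score wave_direction preferred_directions)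

-- ===== LEMMAS AND PROOFS =====

def bucket (d : Int) : Int :=
  if d ≤ 20 then 3 else if d ≤ 45 then 2 else if d ≤ 70 then 1 else 0

theorem bucket_min (a b : Int) : bucket (min a b) = max (bucket a) (bucket b) := by
  unfold bucket
  rcases le_total a b with h | h <;> simp [h] <;>
    split_ifs <;> omega

theorem dirScore_eq (wd d : Int) : directionScore wd d = bucket (angleDiff wd d) := rfl

theorem key_lemma (wd : Int) (ds : List Int) (m acc : Int) (h : acc = bucket m) :
    ds.foldl (fun best direction =>
        let s := directionScore wd direction
        if best < s then s else best) acc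
      = bucket (ds.foldl (fun x y => min x (angleDiff wd y)) m) := by
  induction ds generalizing m acc with
  | nil => simpa using h
  | cons d t ih =>
    simp only [List.foldl_cons]
    apply ih
    rw [h, dirScore_eq]
    rw [bucket_min]
    rcases le_or_gt (bucket m) (bucket (angleDiff wd d)) with hle | hgt
    · rcases eq_or_lt_of_le hle with he | hlt
      · simp [he]
      · simp [hlt, max_eq_right hle]
    · simp [not_lt.mpr (le_of_lt hgt), max_eq_left (le_of_lt hgt)]

theorem bucket_nonneg (d : Int) : 0 ≤ bucket d := by
  unfold bucket; split_ifs <;> omega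

-- ===== VERDICT (by name: the statement is the Claim_ definition above) =====
theorem swell_quality_score_spec : Claim_equal_swell_quality_score := by
  unfold Claim_equal_swell_quality_score
  intro w ps _hdom
  unfold Spec_swell_quality_score swell_quality_score swell_quality_score_alt
  match w with
  | none => rfl
  | some wd =>
    match ps with
    | [] => rfl
    | d :: t =>
      simp only [List.map_cons, PySem.List.min?_id_cons, List.foldl_map]
      have hne : (d :: t : List Int) ≠ [] := by simp
      simp only [if_neg hne]
      have := key_lemma wd t (angleDiff wd d) (bucket (angleDiff wd d)) rfl
      rw [List.foldl_cons]
      have hstep : (if (0:Int) < directionScore wd d then directionScore wd d else 0)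
          = bucket (angleDiff wd d) := by
        rw [dirScore_eq]
        rcases lt_or_ge (0:Int) (bucket (angleDiff wd d)) with hp | hp
        · simp [hp]
        · have h0 := bucket_nonneg (angleDiff wd d)
          have : bucket (angleDiff wd d) = 0 := le_antisymm hp h0
          simp [this]
      rw [hstep, this]
      unfold bucket
      rfl
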